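-- pv_equiv track=rewrite | github.com/be-ez/advent-of-code-2022 | 1.py | find_elf_with_most_calories_v2
-- ===== SOURCE A (Python) =====
-- def find_elf_with_most_calories_v2(input_text: str) -> int:
--     calories_by_elf = []
--     elf_calorie_lists = input_text.split('\n\n')
--     for elf in elf_calorie_lists:
--         calories_in_meal = sum([int(line) for line in elf.split('\n') if line])
--         calories_by_elf.append(calories_in_meal)
--
--     calories_by_elf.sort(reverse=True)
--     return sum(calories_by_elf[0:3])
-- ===== SOURCE B (Python) =====
-- def find_elf_with_most_calories_v2(input_text: str) -> int:
--     top = []  # at most 3 largest per-elf totals, kept in descending order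
--     for elf in input_text.split('\n\n'):
--         total = 0
--         for line in elf.split('\n'):
--             if line:
--                 total += int(line)
--         i = 0
--         while i < len(top) and top[i] >= total:
--             i += 1
--         top.insert(i, total)
--         if len(top) > 3:
--             top.pop()
--     return sum(top)
-- ===== Notes on version B (the rewrite author's own statement) =====
-- stated objective: alternative
-- what changed: Replaces the full sort of all per-elf totals plus a [0:3] slice by a single pass that maintains a running bounded list of the three largest totals (manual ordered insert and trim), and replaces the per-elf list-comprehension sum by a running accumulator.
import Mathlib
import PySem

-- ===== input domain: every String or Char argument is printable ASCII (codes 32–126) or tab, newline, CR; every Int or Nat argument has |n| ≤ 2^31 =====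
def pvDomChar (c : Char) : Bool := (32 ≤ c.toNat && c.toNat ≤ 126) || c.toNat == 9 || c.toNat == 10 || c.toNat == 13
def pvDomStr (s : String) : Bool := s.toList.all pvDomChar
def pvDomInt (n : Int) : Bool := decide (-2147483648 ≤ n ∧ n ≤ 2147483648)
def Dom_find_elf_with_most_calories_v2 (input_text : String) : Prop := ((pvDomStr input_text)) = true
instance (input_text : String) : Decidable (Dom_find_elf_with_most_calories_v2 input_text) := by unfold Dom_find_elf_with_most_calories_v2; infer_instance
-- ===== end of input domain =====

-- B replaces the sort-all-then-slice-top-3 by a single pass maintaining a bounded list of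
-- the three largest per-elf totals, and sums each elf with a running accumulator.

-- ===== PORT A =====
def find_elf_with_most_calories_v2 (input_text : String) : Int :=
  let elf_calorie_lists := (PySem.Str.split? input_text "\n\n").getD []
  let calories_by_elf := elf_calorie_lists.foldl (fun acc elf =>
      acc ++ [((((PySem.Str.split? elf "\n").getD []).filter (fun line => line ≠ "")).map
                 (fun line => (PySem.Int.ofStr? line).getD 0)).sum]) []
  let sortedDesc := PySem.List.sorted calories_by_elf (fun x => x) true
  (PySem.List.slice sortedDesc (some 0) (some 3)).sum

-- ===== PORT B =====
-- top.insert at the first position whose element is < v (scanned past all elements ≥ v)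
def pvInsDesc (v : Int) : List Int → List Int
  | [] => [v]
  | x :: xs => if x ≥ v then x :: pvInsDesc v xs else v :: x :: xs

-- ordered insert followed by the 'if len(top) > 3: top.pop()' trim
def pvPush (top : List Int) (v : Int) : List Int :=
  (pvInsDesc v top).take 3

def find_elf_with_most_calories_v2_alt (input_text : String) : Int :=
  (((PySem.Str.split? input_text "\n\n").getD []).foldl (fun top elf =>
      pvPush top (((PySem.Str.split? elf "\n").getD []).foldl
        (fun total line => if line ≠ "" then total + (PySem.Int.ofStr? line).getD 0 else total) 0)) []).sum

-- ===== PRECONDITION & SPEC =====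
-- Pre_ excludes exactly the inputs where Python A raises ValueError: some nonempty line of
-- some elf block is not a valid int literal.
def Pre_find_elf_with_most_calories_v2 (input_text : String) : Prop :=
  ∀ elf ∈ (PySem.Str.split? input_text "\n\n").getD [],
    ∀ line ∈ (PySem.Str.split? elf "\n").getD [], line ≠ "" → (PySem.Int.ofStr? line).isSome = true
instance (input_text : String) : Decidable (Pre_find_elf_with_most_calories_v2 input_text) := by
  unfold Pre_find_elf_with_most_calories_v2; infer_instance

def pvWitness_find_elf_with_most_calories_v2 : String := "1\n2\n\n10\n\n3\n\n7"

def Spec_find_elf_with_most_calories_v2 (input_text : String) (out : Int) : Prop := out = find_elf_with_most_calories_v2_alt input_text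
instance (input_text : String) (out : Int) : Decidable (Spec_find_elf_with_most_calories_v2 input_text out) := by unfold Spec_find_elf_with_most_calories_v2; infer_instance

-- ===== CLAIM (what is proved, stated in full; the proofs are below) =====
def Claim_equal_find_elf_with_most_calories_v2 : Prop := ∀ (input_text : String), Dom_find_elf_with_most_calories_v2 input_text → Pre_find_elf_with_most_calories_v2 input_text → Spec_find_elf_with_most_calories_v2 input_text (find_elf_with_most_calories_v2 input_text)

-- ===== LEMMAS AND PROOFS =====

-- per-elf sum: running accumulator = sum of mapped filter
theorem pv_foldl_filter_sum (l : List String) (a : Int) :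
    l.foldl (fun total line => if line ≠ "" then total + (PySem.Int.ofStr? line).getD 0 else total) a
      = a + ((l.filter (fun line => line ≠ "")).map (fun line => (PySem.Int.ofStr? line).getD 0)).sum := by
  induction l generalizing a with
  | nil => simp
  | cons x xs ih =>
    simp only [List.foldl_cons, List.filter_cons]
    by_cases h : x = ""
    · simp only [h, ne_eq, not_true_eq_false, if_false, decide_false]
      simpa using ih a
    · simp only [h, ne_eq, not_false_eq_true, if_true, decide_true]
      rw [ih]
      simp [add_assoc]

theorem pv_foldl_append (l : List String) (f : String → Int) (acc : List Int) :
    l.foldl (fun acc elf => acc ++ [f elf]) acc = acc ++ l.map f := by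
  induction l generalizing acc with
  | nil => simp
  | cons x xs ih => simp [ih]

-- take n commutes with ordered insertion into a truncated list
theorem pv_take_insDesc (n : ℕ) (v : Int) (s : List Int) :
    (pvInsDesc v (s.take n)).take n = (pvInsDesc v s).take n := by
  induction s generalizing n with
  | nil => simp
  | cons x xs ih =>
    cases n with
    | zero => simp
    | succ m =>
      simp only [List.take_succ_cons, pvInsDesc]
      by_cases h : x ≥ v
      · simp [h, List.take_succ_cons, ih m]
      · simp only [h, if_false, List.take_succ_cons]
        cases m with
        | zero => simp
        | succ k => simp [List.take_succ_cons, List.take_take]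

-- the bounded-tracker fold is the take-3 of a full insertion fold
theorem pv_fold_push (L : List Int) (s : List Int) :
    L.foldl pvPush (s.take 3) = (L.foldl (fun acc v => pvInsDesc v acc) s).take 3 := by
  induction L generalizing s with
  | nil => rfl
  | cons v L ih =>
    simp only [List.foldl_cons]
    rw [show pvPush (s.take 3) v = (pvInsDesc v s).take 3 from by
          unfold pvPush; exact pv_take_insDesc 3 v s]
    exact ih (pvInsDesc v s)

theorem pv_insDesc_perm (v : Int) (s : List Int) : (pvInsDesc v s).Perm (v :: s) := by
  induction s with
  | nil => simp [pvInsDesc]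
  | cons x xs ih =>
    simp only [pvInsDesc]
    by_cases h : x ≥ v
    · simp only [h, if_true]
      exact ((ih.cons x).trans (List.Perm.swap v x xs))
    · simp [h]

theorem pv_mem_insDesc (y v : Int) (s : List Int) (h : y ∈ pvInsDesc v s) : y = v ∨ y ∈ s := by
  have := (pv_insDesc_perm v s).mem_iff.mp h
  simpa using this

theorem pv_insDesc_pairwise (v : Int) (s : List Int)
    (hs : s.Pairwise (fun a b => b ≤ a)) : (pvInsDesc v s).Pairwise (fun a b => b ≤ a) := by
  induction s with
  | nil => simp [pvInsDesc]
  | cons x xs ih =>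
    rcases List.pairwise_cons.mp hs with ⟨hx, hxs⟩
    simp only [pvInsDesc]
    by_cases h : x ≥ v
    · simp only [h, if_true]
      refine List.pairwise_cons.mpr ⟨?_, ih hxs⟩
      intro y hy
      rcases pv_mem_insDesc y v xs hy with rfl | hy'
      · exact h
      · exact hx y hy'
    · have hvx : x ≤ v := le_of_lt (lt_of_not_ge h)
      simp only [h, if_false]
      refine List.pairwise_cons.mpr ⟨?_, hs⟩
      intro y hy
      rcases List.mem_cons.mp hy with rfl | hy'
      · exact hvx
      · exact le_trans (hx y hy') hvx

theorem pv_foldl_insDesc_perm (L : List Int) (s : List Int) :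
    (L.foldl (fun acc v => pvInsDesc v acc) s).Perm (L ++ s) := by
  induction L generalizing s with
  | nil => simp
  | cons v L ih =>
    simp only [List.foldl_cons]
    refine (ih (pvInsDesc v s)).trans ?_
    exact ((pv_insDesc_perm v s).append_left L).trans List.perm_middle

theorem pv_foldl_insDesc_pairwise (L : List Int) (s : List Int)
    (hs : s.Pairwise (fun a b => b ≤ a)) :
    (L.foldl (fun acc v => pvInsDesc v acc) s).Pairwise (fun a b => b ≤ a) := by
  induction L generalizing s with
  | nil => exact hs
  | cons v L ih => exact ih _ (pv_insDesc_pairwise v s hs)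

-- the stable descending sort equals the insertion-fold (both desc-sorted permutations of L)
theorem pv_sorted_eq_fold (L : List Int) :
    PySem.List.sorted L (fun x => x) true = L.foldl (fun acc v => pvInsDesc v acc) [] := by
  haveI : IsAntisymm Int (fun a b : Int => b ≤ a) := ⟨fun a b h1 h2 => le_antisymm h2 h1⟩
  have hperm : (PySem.List.sorted L (fun x => x) true).Perm
      (L.foldl (fun acc v => pvInsDesc v acc) []) := by
    refine (PySem.List.sorted_perm L (fun x => x) true).trans ?_
    have h := pv_foldl_insDesc_perm L []
    simp only [List.append_nil] at h
    exact h.symm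
  exact hperm.eq_of_pairwise' (PySem.List.sorted_pairwise_rev L (fun x => x))
    (pv_foldl_insDesc_pairwise L [] (by simp))

-- ===== VERDICT (by name: the statement is the Claim_ definition above) =====
theorem find_elf_with_most_calories_v2_spec : Claim_equal_find_elf_with_most_calories_v2 := by
  intro input_text _ _
  unfold Spec_find_elf_with_most_calories_v2
  unfold find_elf_with_most_calories_v2 find_elf_with_most_calories_v2_alt
  simp only [pv_foldl_append, pv_foldl_filter_sum, zero_add]
  set f : String → Int := fun elf =>
    ((((PySem.Str.split? elf "\n").getD []).filter (fun line => line ≠ "")).map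
      (fun line => (PySem.Int.ofStr? line).getD 0)).sum with hf
  set L := ((PySem.Str.split? input_text "\n\n").getD []).map f with hL
  have h1 : ((PySem.Str.split? input_text "\n\n").getD []).foldl (fun top elf => pvPush top (f elf)) []
      = L.foldl pvPush [] := by
    rw [hL, List.foldl_map]
  rw [show (((PySem.Str.split? input_text "\n\n").getD []).foldl (fun top elf => pvPush top (f elf)) [])
        = L.foldl pvPush [] from h1]
  have h2 : L.foldl pvPush [] = (L.foldl (fun acc v => pvInsDesc v acc) []).take 3 := by
    have := pv_fold_push L []
    simpa using this
  rw [h2, ← pv_sorted_eq_fold]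
  congr 1
  have h3 : PySem.List.slice (PySem.List.sorted L (fun x => x) true) (some 0) (some 3)
      = (PySem.List.sorted L (fun x => x) true).take 3 := by
    rw [show ((0:Int)) = ((0:ℕ):Int) from rfl, show ((3:Int)) = ((3:ℕ):Int) from rfl,
        PySem.List.slice_natCast]
    simp
  simp only [List.nil_append]
  rw [h3]
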